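-- pv_equiv track=rewrite | github.com/swapnith8/CP-Problems | 02-hasnoprimes-Python/hasnoprimes.py | fun_hasnoprimes
-- ===== SOURCE A (Python) =====
-- def fun_hasnoprimes(l):
-- 	for i in range(len(l)):
-- 		for j in range(len(l[i])):
-- 			x = l[i][j]
-- 			y = 1
-- 			c =0
-- 			while(x>y):
-- 				if(x%y==0):
-- 					c +=1
-- 					y+=1
-- 				else:
-- 					y+=1
-- 			if c<=1:
-- 				return False
-- 	return True
-- ===== SOURCE B (Python) =====
-- def _is_composite(x):
--     # composite test by trial division up to sqrt(x); anything below 4 is not composite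
--     if x < 4:
--         return False
--     d = 2
--     while d * d <= x:
--         if x % d == 0:
--             return True
--         d += 1
--     return False
--
-- def fun_hasnoprimes(l):
--     return all(_is_composite(x) for row in l for x in row)
-- ===== Notes on version B (the rewrite author's own statement) =====
-- stated objective: alternative
-- what changed: Replaces A's per-element divisor COUNTING over the whole range [1,x) with a short-circuit compositeness test by trial division up to sqrt(x), folded over the grid with all(); intended as faster per element (O(sqrt(M)) vs O(M) in the element magnitude M), but a timing run measured only 1.41x at the largest size, so no speed is claimed.
import Mathlib
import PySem

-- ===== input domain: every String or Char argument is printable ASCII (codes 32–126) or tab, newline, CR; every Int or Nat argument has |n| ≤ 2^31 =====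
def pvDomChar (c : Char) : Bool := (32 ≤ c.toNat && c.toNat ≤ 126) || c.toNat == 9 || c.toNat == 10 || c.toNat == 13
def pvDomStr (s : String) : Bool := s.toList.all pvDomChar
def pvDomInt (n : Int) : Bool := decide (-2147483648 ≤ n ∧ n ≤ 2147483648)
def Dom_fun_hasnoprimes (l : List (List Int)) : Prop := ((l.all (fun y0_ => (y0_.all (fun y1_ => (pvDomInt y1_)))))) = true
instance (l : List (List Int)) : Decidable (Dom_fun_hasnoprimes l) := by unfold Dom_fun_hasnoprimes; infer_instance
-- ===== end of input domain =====

-- B replaces A's per-element divisor counting over all of [1,x) with a short-circuit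
-- trial-division compositeness test up to sqrt(x) folded over the grid with all() (objective: alternative).

-- ===== PORT A =====
-- A's inner while loop: counts divisors y of x with 1 ≤ y < x
def pvCountLoop (x y c : Int) : Int :=
  if x > y then
    if PySem.Int.mod x y == 0 then pvCountLoop x (y + 1) (c + 1)
    else pvCountLoop x (y + 1) c
  else c
termination_by (x - y).toNat
decreasing_by all_goals omega

-- A's inner for-loop over one row: false = early `return False`
def pvRowLoopA (row : List Int) : Bool :=
  match row with
  | [] => true
  | x :: rest => if pvCountLoop x 1 0 ≤ 1 then false else pvRowLoopA rest

def fun_hasnoprimes (l : List (List Int)) : Bool :=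
  match l with
  | [] => true
  | r :: rs => if pvRowLoopA r then fun_hasnoprimes rs else false

-- ===== PORT B =====
-- B's while loop: trial division, true as soon as a divisor d with d*d ≤ x is found
def pvTrial (x d : Int) : Bool :=
  if d * d ≤ x then
    if PySem.Int.mod x d == 0 then true else pvTrial x (d + 1)
  else false
termination_by (x + 2 - d).toNat
decreasing_by
  rename_i h _
  have : d < x + 2 := by nlinarith [sq_nonneg (d - 1)]
  omega

def pvIsComposite (x : Int) : Bool :=
  if x < 4 then false else pvTrial x 2

def fun_hasnoprimes_alt (l : List (List Int)) : Bool :=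
  l.all (fun row => row.all pvIsComposite)

-- ===== PRECONDITION & SPEC =====
def Spec_fun_hasnoprimes (l : List (List Int)) (out : Bool) : Prop := out = fun_hasnoprimes_alt l
instance (l : List (List Int)) (out : Bool) : Decidable (Spec_fun_hasnoprimes l out) := by unfold Spec_fun_hasnoprimes; infer_instance

-- ===== CLAIM (what is proved, stated in full; the proofs are below) =====
def Claim_equal_fun_hasnoprimes : Prop := ∀ (l : List (List Int)), Dom_fun_hasnoprimes l → Spec_fun_hasnoprimes l (fun_hasnoprimes l)

-- ===== LEMMAS AND PROOFS =====

-- A's while loop counts the divisors in [y, x)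
theorem pvCountLoop_eq (x y c : Int) :
    pvCountLoop x y c =
      c + ((PySem.List.pyRange y x 1).countP (fun d => PySem.Int.mod x d == 0) : Int) := by
  unfold pvCountLoop
  split
  · rename_i h
    rw [PySem.List.pyRange_one_cons h, List.countP_cons]
    split
    · rename_i hm
      rw [pvCountLoop_eq x (y + 1) (c + 1)]
      simp
      ring
    · rename_i hm
      rw [pvCountLoop_eq x (y + 1) c]
      simp at hm
      simp

  · rename_i h
    rw [PySem.List.pyRange_one_eq_nil (by omega)]
    simp
termination_by (x - y).toNat
decreasing_by all_goals omega

theorem countA_iff (x : Int) :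
    ¬ (pvCountLoop x 1 0 ≤ 1) ↔ ∃ d, 2 ≤ d ∧ d < x ∧ d ∣ x := by
  rw [pvCountLoop_eq]
  by_cases hx : 2 ≤ x
  · rw [PySem.List.pyRange_one_cons (by omega), List.countP_cons]
    have h1 : (PySem.Int.mod x 1 == 0) = true := by
      simp
    rw [h1]
    simp only [if_true]
    constructor
    · intro h
      have hpos : 0 < (PySem.List.pyRange (1 + 1) x 1).countP (fun d => PySem.Int.mod x d == 0) := by
        omega
      obtain ⟨d, hmem, hd⟩ := List.countP_pos_iff.mp hpos
      rw [PySem.List.mem_pyRange_one] at hmem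
      exact ⟨d, by omega, hmem.2, (PySem.Int.mod_eq_zero_iff_dvd x d).mp (by simpa using hd)⟩
    · rintro ⟨d, h2, hlt, hdvd⟩
      have hpos : 0 < (PySem.List.pyRange (1 + 1) x 1).countP (fun d => PySem.Int.mod x d == 0) := by
        apply List.countP_pos_iff.mpr
        exact ⟨d, PySem.List.mem_pyRange_one.mpr ⟨by omega, hlt⟩,
          by simpa using (PySem.Int.mod_eq_zero_iff_dvd x d).mpr hdvd⟩
      omega
  · rw [PySem.List.pyRange_one_eq_nil (by omega)]
    simp only [List.countP_nil]
    constructor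
    · intro h; omega
    · rintro ⟨d, h2, hlt, _⟩; omega

theorem pvTrial_iff (x d0 : Int) (h1 : 1 ≤ d0) :
    pvTrial x d0 = true ↔ ∃ d, d0 ≤ d ∧ d * d ≤ x ∧ d ∣ x := by
  unfold pvTrial
  split
  · rename_i hle
    split
    · rename_i hm
      simp only [true_iff]
      exact ⟨d0, le_refl _, hle, (PySem.Int.mod_eq_zero_iff_dvd x d0).mp (by simpa using hm)⟩
    · rename_i hm
      rw [pvTrial_iff x (d0 + 1) (by omega)]
      constructor
      · rintro ⟨d, hd, ha, hb⟩; exact ⟨d, by omega, ha, hb⟩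
      · rintro ⟨d, hd, ha, hb⟩
        refine ⟨d, ?_, ha, hb⟩
        rcases eq_or_lt_of_le hd with h | h
        · exfalso; apply hm
          subst h
          simpa using (PySem.Int.mod_eq_zero_iff_dvd x d0).mpr hb
        · omega
  · rename_i hgt
    simp only [Bool.false_eq_true, false_iff]
    rintro ⟨d, hd, ha, _⟩
    have : d0 * d0 ≤ d * d :=
      mul_le_mul hd hd (by omega) (by omega)
    omega
termination_by (x + 2 - d0).toNat
decreasing_by
  have : d0 < x + 2 := by nlinarith [sq_nonneg (d0 - 1)]
  omega

-- the number-theory bridge: a proper divisor in [2, x) exists iff one exists below sqrt(x)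
theorem bridge (x : Int) :
    (∃ d, 2 ≤ d ∧ d < x ∧ d ∣ x) ↔ (4 ≤ x ∧ ∃ d, 2 ≤ d ∧ d * d ≤ x ∧ d ∣ x) := by
  constructor
  · rintro ⟨d, h2, hlt, e, he⟩
    have hxpos : 0 < x := by omega
    have hepos : 0 < e := by nlinarith
    have he2 : 2 ≤ e := by
      rcases (by omega : e = 1 ∨ 2 ≤ e ∨ e ≤ 0) with rfl | h | h
      · omega
      · exact h
      · omega
    refine ⟨by nlinarith, ?_⟩
    rcases le_total d e with hde | hde
    · exact ⟨d, h2, by nlinarith, ⟨e, he⟩⟩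
    · exact ⟨e, he2, by nlinarith, ⟨d, by rw [he]; ring⟩⟩
  · rintro ⟨hx4, d, h2, hsq, hdvd⟩
    exact ⟨d, h2, by nlinarith, hdvd⟩

theorem elem_iff (x : Int) : ¬ (pvCountLoop x 1 0 ≤ 1) ↔ pvIsComposite x = true := by
  rw [countA_iff, bridge]
  unfold pvIsComposite
  split
  · rename_i h
    constructor
    · rintro ⟨h4, _⟩
      exact absurd h4 (by omega)
    · intro hf
      simp at hf
  · rename_i h
    rw [pvTrial_iff x 2 (by omega)]
    simp [show (4:Int) ≤ x by omega]

theorem row_eq (row : List Int) : pvRowLoopA row = row.all pvIsComposite := by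
  induction row with
  | nil => rfl
  | cons x rest ih =>
    simp only [pvRowLoopA, List.all_cons]
    by_cases h : pvCountLoop x 1 0 ≤ 1
    · have hc : pvIsComposite x = false := by
        rcases Bool.eq_false_or_eq_true (pvIsComposite x) with h' | h'
        · exact absurd h ((elem_iff x).mpr h')
        · exact h'
      simp [h, hc]
    · have hc : pvIsComposite x = true := (elem_iff x).mp h
      simp [h, hc, ih]

theorem main_eq (l : List (List Int)) : fun_hasnoprimes l = fun_hasnoprimes_alt l := by
  induction l with
  | nil => rfl
  | cons r rs ih =>
    simp only [fun_hasnoprimes, fun_hasnoprimes_alt, List.all_cons]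
    rw [row_eq]
    by_cases h : r.all pvIsComposite = true
    · simp [h, ih, fun_hasnoprimes_alt]
    · simp [h]

-- ===== VERDICT (by name: the statement is the Claim_ definition above) =====
theorem fun_hasnoprimes_spec : Claim_equal_fun_hasnoprimes := by
  intro l _
  unfold Spec_fun_hasnoprimes
  exact main_eq l
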